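-- pv_equiv track=rewrite | github.com/Demigodofa/Flange-Helper | reports/apply_bolt_csv.py | to_temp_ranges
-- ===== SOURCE A (Python) =====
-- def to_temp_ranges(temp_map):
--     if not temp_map:
--         return []
--     ranges = []
--     temps = sorted(temp_map.keys())
--     start = temps[0]
--     prev = temps[0]
--     current_s = temp_map[start]
--     step = 50
--     for t in temps[1:]:
--         s = temp_map[t]
--         if t == prev + step and s == current_s:
--             prev = t
--             continue
--         ranges.append({'tMin': start, 'tMax': prev, 'S': current_s})
--         start = t
--         prev = t
--         current_s = s
--     ranges.append({'tMin': start, 'tMax': prev, 'S': current_s})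
--     return ranges
-- ===== SOURCE B (Python) =====
-- def to_temp_ranges(temp_map):
--     # Staged, stateless passes: a boolean break-mask over adjacent sorted pairs,
--     # then starts/ends selected by the mask, then zipped into records.
--     temps = sorted(temp_map)
--     if not temps:
--         return []
--     is_break = [b != a + 50 or temp_map[b] != temp_map[a]
--                 for a, b in zip(temps, temps[1:])]
--     starts = [temps[0]] + [t for t, br in zip(temps[1:], is_break) if br]
--     ends = [t for t, br in zip(temps, is_break + [True]) if br]
--     return [{'tMin': s, 'tMax': e, 'S': temp_map[s]} for s, e in zip(starts, ends)]
-- ===== Notes on version B (the rewrite author's own statement) =====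
-- stated objective: alternative
-- what changed: B replaces A's single stateful merging pass (carrying ranges/start/prev/current_s) by staged stateless passes: a boolean break-mask computed over adjacent sorted pairs, then the start and end temperatures selected by filtering with that mask, then zipped together into the range records.
import Mathlib
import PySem

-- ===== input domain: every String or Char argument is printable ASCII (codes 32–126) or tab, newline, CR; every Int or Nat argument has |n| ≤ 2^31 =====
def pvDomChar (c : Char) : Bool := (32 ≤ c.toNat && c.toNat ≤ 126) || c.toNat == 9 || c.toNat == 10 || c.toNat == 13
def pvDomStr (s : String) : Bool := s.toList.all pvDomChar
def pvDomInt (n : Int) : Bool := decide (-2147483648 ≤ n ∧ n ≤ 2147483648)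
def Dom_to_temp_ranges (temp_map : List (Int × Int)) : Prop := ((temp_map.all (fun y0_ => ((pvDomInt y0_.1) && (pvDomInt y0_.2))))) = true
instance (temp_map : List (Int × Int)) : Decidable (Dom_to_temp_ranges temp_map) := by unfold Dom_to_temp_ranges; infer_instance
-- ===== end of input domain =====

-- B rebuilds the ranges from a stateless break-mask over adjacent sorted pairs (starts/ends
-- selected by the mask, then zipped), instead of A's single stateful merging pass; objective:
-- alternative decomposition, same cost; return values proved equal on all inputs.

-- ===== PORT A =====
-- loop body of A's for-loop: state = (ranges, start, prev, current_s)
def pvLoopA (d : PySem.Dict Int Int) (st : List (List (String × Int)) × Int × Int × Int)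
    (t : Int) : List (List (String × Int)) × Int × Int × Int :=
  match st with
  | (ranges, start, prev, cur) =>
    let s := d.getD t 0
    if t = prev + 50 ∧ s = cur then
      (ranges, start, t, cur)
    else
      (ranges ++ [[("tMin", start), ("tMax", prev), ("S", cur)]], t, t, s)

def to_temp_ranges (temp_map : List (Int × Int)) : List (List (String × Int)) :=
  if temp_map = [] then []
  else
    let d := PySem.Dict.ofList temp_map
    let temps := PySem.List.sorted d.keys (fun x => x) false
    match temps with
    | [] => []  -- unreachable: temp_map ≠ [] gives a nonempty key list
    | t0 :: rest =>
      let st := rest.foldl (pvLoopA d) ([], t0, t0, d.getD t0 0)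
      match st with
      | (ranges, start, prev, cur) =>
        ranges ++ [[("tMin", start), ("tMax", prev), ("S", cur)]]

-- ===== PORT B =====
def to_temp_ranges_alt (temp_map : List (Int × Int)) : List (List (String × Int)) :=
  let d := PySem.Dict.ofList temp_map
  let temps := PySem.List.sorted d.keys (fun x => x) false
  if temps = [] then []
  else
    let isBreak := (temps.zip temps.tail).map
      (fun p => p.2 != p.1 + 50 || d.getD p.2 0 != d.getD p.1 0)
    let starts := temps.headD 0 :: ((temps.tail.zip isBreak).filter (·.2)).map (·.1)
    let ends := ((temps.zip (isBreak ++ [true])).filter (·.2)).map (·.1)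
    (starts.zip ends).map (fun p => [("tMin", p.1), ("tMax", p.2), ("S", d.getD p.1 0)])

-- ===== PRECONDITION & SPEC =====
def Spec_to_temp_ranges (temp_map : List (Int × Int)) (out : List (List (String × Int))) : Prop := out = to_temp_ranges_alt temp_map
instance (temp_map : List (Int × Int)) (out : List (List (String × Int))) : Decidable (Spec_to_temp_ranges temp_map out) := by unfold Spec_to_temp_ranges; infer_instance

-- ===== CLAIM (what is proved, stated in full; the proofs are below) =====
def Claim_equal_to_temp_ranges : Prop := ∀ (temp_map : List (Int × Int)), Dom_to_temp_ranges temp_map → Spec_to_temp_ranges temp_map (to_temp_ranges temp_map)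

-- ===== LEMMAS AND PROOFS =====

-- proof-side abbreviation: B's body, parameterized over the current segment start and the
-- remaining sorted sequence (whose head plays the role of A's `prev`)
def pvB (d : PySem.Dict Int Int) (start : Int) (seq : List Int) : List (List (String × Int)) :=
  let isBreak := (seq.zip seq.tail).map
    (fun p => p.2 != p.1 + 50 || d.getD p.2 0 != d.getD p.1 0)
  let starts := start :: ((seq.tail.zip isBreak).filter (·.2)).map (·.1)
  let ends := ((seq.zip (isBreak ++ [true])).filter (·.2)).map (·.1)
  (starts.zip ends).map (fun p => [("tMin", p.1), ("tMax", p.2), ("S", d.getD p.1 0)])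

-- invariant: A's fold finalized from state (ranges, start, prev, d[start]) is ranges ++ the
-- mask-built ranges of prev :: ts started at `start`, provided d[prev] = d[start]
lemma pvFold_eq (d : PySem.Dict Int Int) (ts : List Int) :
    ∀ (ranges : List (List (String × Int))) (start prev : Int),
    d.getD prev 0 = d.getD start 0 →
    (ts.foldl (pvLoopA d) (ranges, start, prev, d.getD start 0)).1
      ++ [[("tMin", (ts.foldl (pvLoopA d) (ranges, start, prev, d.getD start 0)).2.1),
           ("tMax", (ts.foldl (pvLoopA d) (ranges, start, prev, d.getD start 0)).2.2.1),
           ("S", (ts.foldl (pvLoopA d) (ranges, start, prev, d.getD start 0)).2.2.2)]]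
    = ranges ++ pvB d start (prev :: ts) := by
  induction ts with
  | nil =>
    intro ranges start prev _
    simp [pvB]
  | cons t ts ih =>
    intro ranges start prev hprev
    simp only [List.foldl_cons]
    by_cases hc : t = prev + 50 ∧ d.getD t 0 = d.getD start 0
    · obtain ⟨h1, h2⟩ := hc
      subst h1
      have h2' : d.getD (prev + 50) 0 = d.getD prev 0 := h2.trans hprev.symm
      have hA : pvLoopA d (ranges, start, prev, d.getD start 0) (prev + 50)
          = (ranges, start, prev + 50, d.getD start 0) := by
        simp [pvLoopA, h2]
      rw [hA]
      rw [ih ranges start (prev + 50) h2]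
      congr 1
      simp [pvB, h2']
    · have hA : pvLoopA d (ranges, start, prev, d.getD start 0) t
          = (ranges ++ [[("tMin", start), ("tMax", prev), ("S", d.getD start 0)]], t, t,
             d.getD t 0) := by
        simp only [pvLoopA]
        rw [if_neg hc]
      rw [hA]
      have hm : (t != prev + 50 || d.getD t 0 != d.getD start 0) = true := by
        rcases not_and_or.mp hc with h | h <;> simp [h]
      rw [ih (ranges ++ [[("tMin", start), ("tMax", prev), ("S", d.getD start 0)]]) t t rfl]
      rw [List.append_assoc]
      congr 1
      simp [pvB, hprev, hm]

-- ===== VERDICT (by name: the statement is the Claim_ definition above) =====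
theorem to_temp_ranges_spec : Claim_equal_to_temp_ranges := by
  intro temp_map _
  by_cases h : temp_map = []
  · subst h; decide
  · unfold Spec_to_temp_ranges to_temp_ranges to_temp_ranges_alt
    dsimp only
    rw [if_neg h]
    cases hts : PySem.List.sorted (PySem.Dict.ofList temp_map).keys (fun x => x) false with
    | nil => simp
    | cons t0 rest =>
      dsimp only
      rw [if_neg (by simp)]
      rw [pvFold_eq (PySem.Dict.ofList temp_map) rest [] t0 t0 rfl]
      simp [pvB]
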